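-- pv_equiv track=rewrite | github.com/dukedorje/narrative-network | domain/corpus.py | _word_positions
-- ===== SOURCE A (Python) =====
-- def _word_positions(text: str) -> list[tuple[int, int]]:
--     """Return (start, end) byte offsets for each whitespace-delimited word."""
--     positions: list[tuple[int, int]] = []
--     start = None
--     for i, ch in enumerate(text):
--         if ch.isspace():
--             if start is not None:
--                 positions.append((start, i))
--                 start = None
--         else:
--             if start is None:
--                 start = i
--     if start is not None:
--         positions.append((start, len(text)))
--     return positions
-- ===== SOURCE B (Python) =====
-- def _word_positions(text: str) -> list[tuple[int, int]]:
--     """Return (start, end) offsets for each whitespace-delimited word.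
--
--     Two-pointer run scan: skip whitespace, then consume a whole word run
--     and append its span, instead of tracking an open-word flag per char.
--     """
--     positions: list[tuple[int, int]] = []
--     n = len(text)
--     i = 0
--     while i < n:
--         if text[i].isspace():
--             i += 1
--             continue
--         start = i
--         while i < n and not text[i].isspace():
--             i += 1
--         positions.append((start, i))
--     return positions
-- ===== Notes on version B (the rewrite author's own statement) =====
-- stated objective: alternative
-- what changed: Replaces the per-character flag-tracking pass (optional open-word start carried through one for loop, flushed after the loop) with a two-pointer run scanner that skips whitespace runs and consumes each word run whole, appending its span immediately.
import Mathlib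
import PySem

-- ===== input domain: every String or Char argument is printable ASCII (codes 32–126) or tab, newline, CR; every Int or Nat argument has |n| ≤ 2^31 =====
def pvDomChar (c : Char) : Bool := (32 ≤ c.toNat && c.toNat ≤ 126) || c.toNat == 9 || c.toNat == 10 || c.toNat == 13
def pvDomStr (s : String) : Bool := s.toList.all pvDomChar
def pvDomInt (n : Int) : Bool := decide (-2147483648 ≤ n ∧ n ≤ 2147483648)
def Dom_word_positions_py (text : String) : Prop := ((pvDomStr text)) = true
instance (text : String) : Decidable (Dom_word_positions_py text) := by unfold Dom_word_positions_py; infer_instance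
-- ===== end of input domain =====

-- B replaces A's per-character flag-tracking pass by a two-pointer run scanner (alternative decomposition, same cost).

-- ===== PORT A =====
-- one step of A's for-loop: state = (positions, start)
def pvStepA (s : List (Int × Int) × Option Int) (p : Int × Char) : List (Int × Int) × Option Int :=
  if PySem.Chars.isspace p.2 then
    match s.2 with
    | some st0 => (s.1 ++ [(st0, p.1)], none)
    | none => s
  else
    match s.2 with
    | some _ => s
    | none => (s.1, some p.1)

def word_positions_py (text : String) : List (Int × Int) :=
  let st := (PySem.List.enumerate text.toList 0).foldl pvStepA ([], none)
  match st.2 with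
  | some st0 => st.1 ++ [(st0, PySem.Str.len text)]
  | none => st.1

-- ===== PORT B =====
-- inner while loop of B: consume a word run, return (end index, rest of the chars)
def pvSkipWord : List Char → Nat → Nat × List Char
  | [], i => (i, [])
  | c :: cs, i => if PySem.Chars.isspace c then (i, c :: cs) else pvSkipWord cs (i + 1)

theorem pvSkipWord_len_le (cs : List Char) (i : Nat) : (pvSkipWord cs i).2.length ≤ cs.length := by
  induction cs generalizing i with
  | nil => simp [pvSkipWord]
  | cons c cs ih =>
    simp only [pvSkipWord]
    split
    · simp
    · exact Nat.le_trans (ih (i + 1)) (Nat.le_succ _)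

-- outer while loop of B
def pvWordsGo : List Char → Nat → List (Int × Int)
  | [], _ => []
  | c :: cs, i =>
    if PySem.Chars.isspace c then pvWordsGo cs (i + 1)
    else
      let p := pvSkipWord cs (i + 1)
      ((i : Int), (p.1 : Int)) :: pvWordsGo p.2 p.1
termination_by cs _ => cs.length
decreasing_by
  all_goals
    have h := pvSkipWord_len_le cs (i + 1)
    simp only [List.length_cons]
    omega

def word_positions_py_alt (text : String) : List (Int × Int) :=
  pvWordsGo text.toList 0

-- ===== PRECONDITION & SPEC =====
def Spec_word_positions_py (text : String) (out : List (Int × Int)) : Prop := out = word_positions_py_alt text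
instance (text : String) (out : List (Int × Int)) : Decidable (Spec_word_positions_py text out) := by unfold Spec_word_positions_py; infer_instance

-- ===== CLAIM (what is proved, stated in full; the proofs are below) =====
def Claim_equal_word_positions_py : Prop := ∀ (text : String), Dom_word_positions_py text → Spec_word_positions_py text (word_positions_py text)

-- ===== LEMMAS AND PROOFS =====

-- finalize A's loop state with the end offset e (the code after A's for loop)
def pvFinA (s : List (Int × Int) × Option Int) (e : Int) : List (Int × Int) :=
  match s.2 with
  | some st0 => s.1 ++ [(st0, e)]
  | none => s.1

-- combined loop invariant for A's fold, in both states, by strong induction on the fuel n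
theorem pvLoopA_inv : ∀ (n : Nat) (cs : List Char), cs.length ≤ n → ∀ (k : Nat) (acc : List (Int × Int)) (st : Option Int),
    pvFinA ((PySem.List.enumerate cs (k : Int)).foldl pvStepA (acc, st)) ((k + cs.length : Nat) : Int) =
      acc ++ (match st with
              | none => pvWordsGo cs k
              | some s0 => (s0, ((pvSkipWord cs k).1 : Int)) :: pvWordsGo (pvSkipWord cs k).2 (pvSkipWord cs k).1) := by
  intro n
  induction n with
  | zero =>
    intro cs hcs k acc st
    have : cs = [] := List.eq_nil_of_length_eq_zero (Nat.le_zero.mp hcs)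
    subst this
    cases st <;> simp [PySem.List.enumerate, pvFinA, pvWordsGo.eq_def, pvSkipWord]
  | succ n ih =>
    intro cs hcs k acc st
    cases cs with
    | nil => cases st <;> simp [PySem.List.enumerate, pvFinA, pvWordsGo.eq_def, pvSkipWord]
    | cons c cs =>
      have hlen : cs.length ≤ n := by simpa using hcs
      have hk1 : ((k : Int) + 1) = ((k + 1 : Nat) : Int) := by push_cast; ring
      have hend : ((k + (c :: cs).length : Nat) : Int) = (((k + 1) + cs.length : Nat) : Int) := by
        push_cast; simp; ring
      rw [PySem.List.enumerate_cons, List.foldl_cons, hend]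
      by_cases hsp : PySem.Chars.isspace c
      · cases st with
        | none =>
          have hstep : pvStepA (acc, none) ((k : Int), c) = (acc, none) := by
            simp [pvStepA, hsp]
          rw [hstep, hk1, ih cs hlen (k + 1) acc none]
          conv_rhs => rw [pvWordsGo.eq_def]
          simp [hsp]
        | some s0 =>
          have hstep : pvStepA (acc, some s0) ((k : Int), c) = (acc ++ [(s0, (k : Int))], none) := by
            simp [pvStepA, hsp]
          rw [hstep, hk1, ih cs hlen (k + 1) (acc ++ [(s0, (k : Int))]) none]
          conv_rhs => rw [pvWordsGo.eq_def]
          simp [pvSkipWord, hsp, List.append_assoc]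
          conv_rhs => rw [pvWordsGo.eq_def]
          simp [hsp]
      · cases st with
        | none =>
          have hstep : pvStepA (acc, none) ((k : Int), c) = (acc, some (k : Int)) := by
            simp [pvStepA, hsp]
          rw [hstep, hk1, ih cs hlen (k + 1) acc (some ((k : Nat) : Int))]
          conv_rhs => rw [pvWordsGo.eq_def]
          simp [hsp]
        | some s0 =>
          have hstep : pvStepA (acc, some s0) ((k : Int), c) = (acc, some s0) := by
            simp [pvStepA, hsp]
          rw [hstep, hk1, ih cs hlen (k + 1) acc (some s0)]
          simp [pvSkipWord, hsp]

theorem word_positions_eq (text : String) : word_positions_py text = word_positions_py_alt text := by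
  have h := pvLoopA_inv text.toList.length text.toList le_rfl 0 [] none
  simp only [Nat.zero_add, List.nil_append] at h
  unfold word_positions_py word_positions_py_alt
  have hlen : PySem.Str.len text = ((text.toList.length : Nat) : Int) := by
    simp [PySem.Str.len_eq]
  rw [hlen]
  exact h

-- ===== VERDICT (by name: the statement is the Claim_ definition above) =====
theorem word_positions_py_spec : Claim_equal_word_positions_py := by
  intro text _
  exact word_positions_eq text
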